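-- pv_equiv track=rewrite | github.com/jk-jung/problem-solving | codewars/6kyu/6_Blocky Octahedrons.py | create_octahedron
-- ===== SOURCE A (Python) =====
-- def create_octahedron(n):
--     if n < 3 or n % 2 == 0: return []
--     r = []
--     m = n // 2
--     for i in range(m + 1):
--         t = [[0] * n for _ in range(n)]
--         r.append(t)
--         for y in range(n):
--             for x in range(n):
--                 if abs(x - m) + abs(y - m) <= i:t[y][x]=1
--
--     return r + r[::-1][1:]
-- ===== SOURCE B (Python) =====
-- def create_octahedron(n):
--     if n < 3 or n % 2 == 0: return []
--     m = n // 2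
--     result = []
--     for z in range(n):
--         radius = m - abs(z - m)
--         result.append([[1 if abs(x - m) + abs(y - m) <= radius else 0
--                         for x in range(n)] for y in range(n)])
--     return result
-- ===== Notes on version B (the rewrite author's own statement) =====
-- stated objective: simpler
-- what changed: B computes each of the n layers directly from a per-layer radius m - |z - m| in one pass with comprehensions, instead of A's build-half-then-mirror (r + r[::-1][1:]) with in-place mutation of a zero grid.
import Mathlib
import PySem

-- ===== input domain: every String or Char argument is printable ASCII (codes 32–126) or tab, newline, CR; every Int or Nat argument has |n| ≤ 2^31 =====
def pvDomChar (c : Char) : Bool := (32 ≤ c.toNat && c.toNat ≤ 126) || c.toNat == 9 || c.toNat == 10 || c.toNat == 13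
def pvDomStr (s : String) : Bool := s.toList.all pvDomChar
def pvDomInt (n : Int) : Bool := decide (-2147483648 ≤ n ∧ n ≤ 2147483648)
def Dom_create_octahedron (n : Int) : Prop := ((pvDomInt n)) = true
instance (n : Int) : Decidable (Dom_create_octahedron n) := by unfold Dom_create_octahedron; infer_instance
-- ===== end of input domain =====

-- B replaces A's build-half-then-mirror (r + r[::-1][1:]) with in-place grid mutation by a
-- direct one-pass construction from a per-layer radius m - |z - m| (objective: simpler).
-- A's mirrored halves alias the same Python list objects while B's layers are fresh lists;
-- the equivalence proved here is about the returned value (==), not object identity.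

-- ===== PORT A =====
def create_octahedron (n : Int) : List (List (List Int)) :=
  if n < 3 ∨ PySem.Int.mod n 2 = 0 then []
  else
    let m := PySem.Int.floordiv n 2
    let r := (PySem.List.pyRange 0 (m + 1) 1).foldl (fun r i =>
      let t0 : List (List Int) :=
        (PySem.List.pyRange 0 n 1).map (fun _ => PySem.List.pyRepeat [(0 : Int)] n)
      let t := (PySem.List.pyRange 0 n 1).foldl (fun t y =>
        (PySem.List.pyRange 0 n 1).foldl (fun t x =>
          if |x - m| + |y - m| ≤ i then
            t.set y.toNat ((t.getD y.toNat []).set x.toNat 1)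
          else t) t) t0
      r ++ [t]) []
    r ++ (((PySem.List.slice? r none none (-1)).getD []).tail)

-- ===== PORT B =====
def create_octahedron_alt (n : Int) : List (List (List Int)) :=
  if n < 3 ∨ PySem.Int.mod n 2 = 0 then []
  else
    let m := PySem.Int.floordiv n 2
    (PySem.List.pyRange 0 n 1).map (fun z =>
      let radius := m - |z - m|
      (PySem.List.pyRange 0 n 1).map (fun y =>
        (PySem.List.pyRange 0 n 1).map (fun x =>
          if |x - m| + |y - m| ≤ radius then (1 : Int) else 0)))

-- ===== PRECONDITION & SPEC =====
def Spec_create_octahedron (n : Int) (out : List (List (List Int))) : Prop := out = create_octahedron_alt n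
instance (n : Int) (out : List (List (List Int))) : Decidable (Spec_create_octahedron n out) := by unfold Spec_create_octahedron; infer_instance

-- ===== CLAIM (what is proved, stated in full; the proofs are below) =====
def Claim_equal_create_octahedron : Prop := ∀ (n : Int), Dom_create_octahedron n → Spec_create_octahedron n (create_octahedron n)

-- ===== LEMMAS AND PROOFS =====

-- one layer as a pure double map over Nat ranges (the common normal form of both ports)
def pvLayer (N : Nat) (m rad : Int) : List (List Int) :=
  (List.range N).map (fun (y : Nat) =>
    (List.range N).map (fun (x : Nat) =>
      if |(x : Int) - m| + |(y : Int) - m| ≤ rad then (1 : Int) else 0))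

theorem pv_pyRange_cast (N : Nat) :
    PySem.List.pyRange 0 (N : Int) 1 = (List.range N).map (Nat.cast : Nat → Int) := by
  rw [PySem.List.pyRange_one]
  simp

-- the inner x-loop of A only rewrites row y of the grid
theorem pv_inner_fold (C : Int → Prop) [DecidablePred C] (xs : List Int) (y : Nat)
    (t : List (List Int)) :
    xs.foldl (fun t x => if C x then t.set y ((t.getD y []).set x.toNat 1) else t) t
      = t.set y (xs.foldl (fun r x => if C x then r.set x.toNat 1 else r) (t.getD y [])) := by
  induction xs generalizing t with
  | nil =>
    simp only [List.foldl_nil]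
    by_cases h : y < t.length
    · rw [List.getD_eq_getElem t [] h, List.set_getElem_self]
    · rw [List.set_eq_of_length_le (by omega)]
  | cons x xs ih =>
    simp only [List.foldl_cons]
    by_cases hc : C x
    · simp only [if_pos hc]
      rw [ih]
      by_cases h : y < t.length
      · rw [List.getD_eq_getElem _ [] h]
        have h2 : (t.set y (t[y].set x.toNat 1)).getD y [] = t[y].set x.toNat 1 := by
          rw [List.getD_eq_getElem _ [] (by simpa using h)]
          simp
        rw [h2, List.set_set]
      · rw [List.set_eq_of_length_le (by simpa using (le_of_not_gt h)),
            List.set_eq_of_length_le (le_of_not_gt h), List.set_eq_of_length_le (le_of_not_gt h)]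
    · simp only [if_neg hc]
      exact ih t

-- filling a zero row left to right gives the 0/1 characteristic row
theorem pv_row_fold (N k : Nat) (hk : k ≤ N) (C : Nat → Prop) [DecidablePred C] :
    (List.range k).foldl (fun (r : List Int) j => if C j then r.set j 1 else r)
        (List.replicate N 0)
      = (List.range N).map (fun j => if j < k ∧ C j then (1 : Int) else 0) := by
  induction k with
  | zero => simp [List.map_const']
  | succ k ih =>
    rw [List.range_succ, List.foldl_append, ih (by omega)]
    simp only [List.foldl_cons, List.foldl_nil]
    by_cases hc : C k
    · rw [if_pos hc]
      apply List.ext_getElem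
      · simp
      · intro j h1 h2
        simp only [List.getElem_set, List.getElem_map, List.getElem_range]
        by_cases hj : k = j
        · subst hj; simp [hc]
        · rw [if_neg hj]
          congr 1
          simp only [eq_iff_iff]
          constructor <;> rintro ⟨a, b⟩ <;> exact ⟨by omega, b⟩
    · rw [if_neg hc]
      apply List.map_congr_left
      intro j hj
      congr 1
      simp only [eq_iff_iff]
      constructor <;> rintro ⟨a, b⟩
      · exact ⟨by omega, b⟩
      · refine ⟨?_, b⟩
        rcases Nat.lt_succ_iff_lt_or_eq.mp a with h | h
        · exact h
        · subst h; exact absurd b hc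

-- writing each row once, left to right, over a constant initial grid
theorem pv_outer_fold {α : Type} (N k : Nat) (hk : k ≤ N) (a : α) (F : Nat → α → α)
    (d : α) :
    (List.range k).foldl (fun (g : List α) j => g.set j (F j (g.getD j d)))
        (List.replicate N a)
      = (List.range N).map (fun j => if j < k then F j a else a) := by
  induction k with
  | zero => simp [List.map_const']
  | succ k ih =>
    rw [List.range_succ, List.foldl_append, ih (by omega)]
    simp only [List.foldl_cons, List.foldl_nil]
    have hlen : k < ((List.range N).map (fun j => if j < k then F j a else a)).length := by
      simpa using (by omega : k < N)
    rw [List.getD_eq_getElem _ d hlen]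
    simp only [List.getElem_map, List.getElem_range]
    rw [if_neg (by omega)]
    apply List.ext_getElem
    · simp
    · intro j h1 h2
      simp only [List.getElem_set, List.getElem_map, List.getElem_range]
      by_cases hj : k = j
      · subst hj; simp
      · rw [if_neg hj]
        have hjN : j < N := by simpa using h2
        by_cases hlt : j < k
        · rw [if_pos hlt, if_pos (by omega)]
        · rw [if_neg hlt, if_neg (by omega)]

-- A's mutated grid for loop parameter i equals the pure layer of radius i
theorem pv_gridA (N : Nat) (m i : Int) :
    (PySem.List.pyRange 0 (N : Int) 1).foldl (fun t y =>
        (PySem.List.pyRange 0 (N : Int) 1).foldl (fun t x =>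
          if |x - m| + |y - m| ≤ i then
            t.set y.toNat ((t.getD y.toNat []).set x.toNat 1)
          else t) t)
      ((PySem.List.pyRange 0 (N : Int) 1).map (fun _ => PySem.List.pyRepeat [(0 : Int)] (N : Int)))
      = pvLayer N m i := by
  have ht0 : (PySem.List.pyRange 0 (N : Int) 1).map (fun _ => PySem.List.pyRepeat [(0 : Int)] (N : Int))
      = List.replicate N (List.replicate N (0 : Int)) := by
    simp [PySem.List.pyRepeat_singleton, List.map_const', PySem.List.length_pyRange_one]
  rw [ht0]
  simp only [pv_inner_fold]
  simp only [pv_pyRange_cast, List.foldl_map, Int.toNat_natCast]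
  rw [pv_outer_fold N N le_rfl (List.replicate N (0 : Int))
      (fun (j : Nat) (r : List Int) => (List.range N).foldl
        (fun (r : List Int) (x : Nat) => if |(x : Int) - m| + |(j : Int) - m| ≤ i then r.set x 1 else r) r) []]
  unfold pvLayer
  apply List.map_congr_left
  intro y hy
  rw [if_pos (List.mem_range.mp hy)]
  rw [pv_row_fold N N le_rfl]
  apply List.map_congr_left
  intro x hx
  simp [List.mem_range.mp hx]

-- B's triple map equals the pure layer for the given radius
theorem pv_gridB (N : Nat) (m rad : Int) :
    (PySem.List.pyRange 0 (N : Int) 1).map (fun y =>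
        (PySem.List.pyRange 0 (N : Int) 1).map (fun x =>
          if |x - m| + |y - m| ≤ rad then (1 : Int) else 0))
      = pvLayer N m rad := by
  simp only [pv_pyRange_cast, List.map_map]
  rfl

-- assembling the n layers from the first half and its mirror
theorem pv_assemble {α : Type} (M : Nat) (g : Int → α) :
    (List.range (2 * M + 1)).map (fun (z : Nat) => g ((M : Int) - |(z : Int) - (M : Int)|))
      = (List.range (M + 1)).map (fun (k : Nat) => g (k : Int))
        ++ (((List.range (M + 1)).map (fun (k : Nat) => g (k : Int))).reverse).tail := by
  rw [show 2 * M + 1 = (M + 1) + M by ring, List.range_add, List.map_append, List.map_map]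
  congr 1
  · apply List.map_congr_left
    intro z hz
    have hzM : z ≤ M := by have := List.mem_range.mp hz; omega
    have hz' : (z : Int) ≤ (M : Int) := by exact_mod_cast hzM
    rw [abs_of_nonpos (by omega)]
    congr 1
    omega
  · apply List.ext_getElem
    · simp
    · intro j h1 h2
      have hjM : j < M := by simpa using h1
      simp only [List.getElem_map, Function.comp_apply, List.getElem_tail, List.getElem_reverse,
        List.length_map, List.length_range, List.getElem_range]
      have hc : ((M + 1 + j : Nat) : Int) - (M : Int) = (j : Int) + 1 := by push_cast; ring
      rw [hc, abs_of_nonneg (by omega)]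
      congr 1
      omega

-- ===== VERDICT (by name: the statement is the Claim_ definition above) =====
theorem create_octahedron_spec : Claim_equal_create_octahedron := by
  intro n _
  unfold Spec_create_octahedron create_octahedron create_octahedron_alt
  by_cases hg : n < 3 ∨ PySem.Int.mod n 2 = 0
  · rw [if_pos hg, if_pos hg]
  · rw [if_neg hg, if_neg hg]
    obtain ⟨h3, hodd⟩ := not_or.mp hg
    have hpos : (0 : Int) < n := by omega
    have hm : PySem.Int.floordiv n 2 = n / 2 := PySem.Int.floordiv_eq_ediv_of_pos (by omega)
    have hmod : PySem.Int.mod n 2 = n % 2 := PySem.Int.mod_eq_emod_of_pos (by omega)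
    rw [hmod] at hodd
    have h1 : n % 2 = 1 := by omega
    have hodd' : n = 2 * (n / 2) + 1 := by omega
    set M : Nat := (n / 2).toNat with hM
    have hmM : n / 2 = (M : Int) := by
      rw [hM]; omega
    have hn : n = ((2 * M + 1 : Nat) : Int) := by push_cast; omega
    have hm1 : n / 2 + 1 = ((M + 1 : Nat) : Int) := by push_cast; omega
    simp only [hm, hmM] at *
    rw [PySem.List.foldl_append_singleton_eq_map, PySem.List.slice?_none_none_neg_one]
    simp only [Option.getD_some]
    rw [hn, hm1] at *
    simp only [pv_gridA, pv_gridB]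
    rw [pv_pyRange_cast (2 * M + 1), pv_pyRange_cast (M + 1), List.map_map, List.map_map]
    have hasm := pv_assemble (α := List (List Int)) M (fun rad => pvLayer (2 * M + 1) ((M : Nat) : Int) rad)
    simp only [Function.comp_def, List.nil_append]
    exact hasm.symm
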